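-- pv_equiv track=rewrite | github.com/syakoo/competitive-programming | atcoder/aising2020/d.py | f
-- ===== SOURCE A (Python) =====
-- def f(n: int) -> int:
--     if n == 0:
--         return 0
--     cnt = 0
--     x = n
--     while x > 0:
--         cnt += x & 1
--         x >>= 1
--
--     return f(n % cnt) + 1
-- ===== SOURCE B (Python) =====
-- def f(n: int) -> int:
--     steps = 0
--     while n != 0:
--         n %= bin(n).count("1")
--         steps += 1
--     return steps
-- ===== Notes on version B (the rewrite author's own statement) =====
-- stated objective: simpler
-- what changed: Replaced the tail recursion and the hand-written shift-and-mask popcount loop by a plain iterative while-loop with a step counter that uses bin(n).count('1') for the popcount.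
import Mathlib
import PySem

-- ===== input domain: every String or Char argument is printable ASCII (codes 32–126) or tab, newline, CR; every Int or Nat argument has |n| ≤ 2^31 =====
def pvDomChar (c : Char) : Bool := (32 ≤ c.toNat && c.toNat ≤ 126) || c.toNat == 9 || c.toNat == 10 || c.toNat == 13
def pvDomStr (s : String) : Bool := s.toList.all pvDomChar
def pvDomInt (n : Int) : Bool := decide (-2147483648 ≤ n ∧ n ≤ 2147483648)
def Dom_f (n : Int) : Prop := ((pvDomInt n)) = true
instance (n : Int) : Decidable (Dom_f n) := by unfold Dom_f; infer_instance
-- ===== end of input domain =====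

-- B replaces A's tail recursion and hand-written shift/mask popcount loop by one
-- iterative while-loop with a step counter and a library popcount (simpler).

-- ===== PORT A =====
-- Termination helper for the shift loop, cited by decreasing_by below.
theorem shiftRight_one_nonneg (x : Int) (hx : 0 ≤ x) : x >>> 1 = x / 2 := by
  obtain ⟨m, rfl⟩ := Int.eq_ofNat_of_zero_le hx
  have h1 : (1 : Int) = ((1 : Nat) : Int) := rfl
  rw [h1, Int.shiftRight_natCast, Nat.shiftRight_eq_div_pow]
  simp

-- A's inner `while x > 0: cnt += x & 1; x >>= 1` loop.
def fPopLoop (x cnt : Int) : Int :=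
  if _h : 0 < x then fPopLoop (x >>> 1) (cnt + PySem.Int.band x 1) else cnt
termination_by x.toNat
decreasing_by
  have := shiftRight_one_nonneg x (by omega)
  omega

-- A's recursion `f(n % cnt) + 1`, with a fuel guard that only makes it total
-- (fuel n.natAbs + 1 always suffices on the inputs where Python A returns).
def fAux : Nat → Int → Int
  | 0, _ => 0
  | fuel + 1, n =>
    if n = 0 then 0
    else fAux fuel (PySem.Int.mod n (fPopLoop n 0)) + 1

def f (n : Int) : Int := fAux (n.natAbs + 1) n

-- ===== PORT B =====
-- B's `while n != 0: n %= bin(n).count("1"); steps += 1` loop, same fuel guard;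
-- bin(n).count("1") is Python's popcount of |n|, PySem.Int.bitCount.
def fAltAux : Nat → Int → Int → Int
  | 0, _, steps => steps
  | fuel + 1, n, steps =>
    if n = 0 then steps
    else fAltAux fuel (PySem.Int.mod n (PySem.Int.bitCount n : Int)) (steps + 1)

def f_alt (n : Int) : Int := fAltAux (n.natAbs + 1) n 0

-- ===== PRECONDITION & SPEC =====
-- Pre_ excludes exactly the negative inputs: there A's popcount loop never runs and
-- `n % 0` raises ZeroDivisionError, so Python A returns only for n ≥ 0.
def Pre_f (n : Int) : Prop := 0 ≤ n
instance (n : Int) : Decidable (Pre_f n) := by unfold Pre_f; infer_instance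
def pvWitness_f : Int := 6

def Spec_f (n : Int) (out : Int) : Prop := out = f_alt n
instance (n : Int) (out : Int) : Decidable (Spec_f n out) := by unfold Spec_f; infer_instance

-- ===== CLAIM (what is proved, stated in full; the proofs are below) =====
def Claim_equal_f : Prop := ∀ (n : Int), Dom_f n → Pre_f n → Spec_f n (f n)

-- ===== LEMMAS AND PROOFS =====

-- A's popcount loop computes Python's n.bit_count() plus the accumulator.
theorem fPopLoop_eq (x : Int) (hx : 0 ≤ x) (cnt : Int) :
    fPopLoop x cnt = cnt + (PySem.Int.bitCount x : Int) := by
  rw [fPopLoop]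
  split_ifs with h
  · have hsr := shiftRight_one_nonneg x hx
    have hdiv : PySem.Int.floordiv x 2 = x / 2 :=
      PySem.Int.floordiv_eq_ediv_of_pos (by omega)
    have hx2 : (0:Int) ≤ x / 2 := by positivity
    have ih := fPopLoop_eq (x >>> 1) (by omega) (cnt + PySem.Int.band x 1)
    rw [ih, PySem.Int.band_one, PySem.Int.bitCount_of_pos h]
    have hm0 : 0 ≤ PySem.Int.mod x 2 := by apply PySem.Int.mod_nonneg; norm_num
    have hm2 : PySem.Int.mod x 2 < 2 := by apply PySem.Int.mod_lt; norm_num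
    have hcast : ((PySem.Int.mod x 2).toNat : Int) = PySem.Int.mod x 2 :=
      Int.toNat_of_nonneg hm0
    rw [hsr, ← hdiv]
    push_cast
    omega
  · have hx0 : x = 0 := by omega
    subst hx0
    simp [PySem.Int.bitCount_zero]
termination_by x.toNat
decreasing_by
  have := shiftRight_one_nonneg x hx
  omega

theorem bitCount_pos (n : Int) (h : 0 < n) : 0 < PySem.Int.bitCount n := by
  rw [PySem.Int.bitCount_of_pos h]
  have hm0 : 0 ≤ PySem.Int.mod n 2 := by apply PySem.Int.mod_nonneg; norm_num
  have hm2 : PySem.Int.mod n 2 < 2 := by apply PySem.Int.mod_lt; norm_num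
  have hq := PySem.Int.floordiv_mul_add_mod n 2
  by_cases h1 : PySem.Int.mod n 2 = 1
  · omega
  · have hm : PySem.Int.mod n 2 = 0 := by omega
    have hqpos : 0 < PySem.Int.floordiv n 2 := by omega
    have := bitCount_pos (PySem.Int.floordiv n 2) hqpos
    omega
termination_by n.toNat
decreasing_by
  have hdiv : PySem.Int.floordiv n 2 = n / 2 :=
    PySem.Int.floordiv_eq_ediv_of_pos (by norm_num)
  omega

theorem bitCount_le (n : Int) (h : 0 < n) : (PySem.Int.bitCount n : Int) ≤ n := by
  rw [PySem.Int.bitCount_of_pos h]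
  have hm0 : 0 ≤ PySem.Int.mod n 2 := by apply PySem.Int.mod_nonneg; norm_num
  have hm2 : PySem.Int.mod n 2 < 2 := by apply PySem.Int.mod_lt; norm_num
  have hq := PySem.Int.floordiv_mul_add_mod n 2
  have hdiv : PySem.Int.floordiv n 2 = n / 2 :=
    PySem.Int.floordiv_eq_ediv_of_pos (by norm_num)
  by_cases hq0 : PySem.Int.floordiv n 2 ≤ 0
  · have hqe : PySem.Int.floordiv n 2 = 0 := by omega
    rw [hqe]
    simp [PySem.Int.bitCount_zero]
    omega
  · have := bitCount_le (PySem.Int.floordiv n 2) (by omega)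
    push_cast
    omega
termination_by n.toNat
decreasing_by
  have hdiv : PySem.Int.floordiv n 2 = n / 2 :=
    PySem.Int.floordiv_eq_ediv_of_pos (by norm_num)
  omega

theorem main_lemma (k : Nat) : ∀ (n : Int) (f1 f2 : Nat) (steps : Int),
    0 ≤ n → n.toNat ≤ k → n.natAbs < f1 → n.natAbs < f2 →
    fAux f1 n + steps = fAltAux f2 n steps := by
  induction k with
  | zero =>
    intro n f1 f2 steps h0 hk h1 h2
    have hn : n = 0 := by omega
    subst hn
    match f1, f2, h1, h2 with
    | g1 + 1, g2 + 1, _, _ => simp [fAux, fAltAux]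
  | succ k ih =>
    intro n f1 f2 steps h0 hk h1 h2
    match f1, f2, h1, h2 with
    | g1 + 1, g2 + 1, h1, h2 =>
      by_cases hn : n = 0
      · simp [fAux, fAltAux, hn]
      · have hpos : 0 < n := by omega
        simp only [fAux, fAltAux, if_neg hn]
        rw [fPopLoop_eq n h0 0, zero_add]
        have hc : (0:Int) < (PySem.Int.bitCount n : Int) := by
          exact_mod_cast bitCount_pos n hpos
        have hcle : (PySem.Int.bitCount n : Int) ≤ n := bitCount_le n hpos
        have hn'0 : 0 ≤ PySem.Int.mod n (PySem.Int.bitCount n : Int) := by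
          apply PySem.Int.mod_nonneg; exact hc
        have hn'lt : PySem.Int.mod n (PySem.Int.bitCount n : Int) < (PySem.Int.bitCount n : Int) := by
          apply PySem.Int.mod_lt; exact hc
        have := ih (PySem.Int.mod n (PySem.Int.bitCount n : Int)) g1 g2 (steps + 1)
          hn'0 (by omega) (by omega) (by omega)
        omega

-- ===== VERDICT (by name: the statement is the Claim_ definition above) =====
theorem f_spec : Claim_equal_f := by
  intro n _ hpre
  unfold Spec_f f f_alt
  have := main_lemma n.toNat n (n.natAbs + 1) (n.natAbs + 1) 0 hpre (le_refl _)
    (by omega) (by omega)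
  omega
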